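-- pv_equiv track=rewrite | github.com/ngarneau/contextual-mimick | utils.py | vectorize_sequence
-- ===== SOURCE A (Python) =====
-- def vectorize_sequence(sequence, to_idx):
--     if 'UNK' in to_idx:
--         unknown_index = to_idx['UNK']
--         v = list()
--         for item in sequence:
--             if item in to_idx:
--                 v.append(to_idx[item])
--             elif item.capitalize() in to_idx:
--                 v.append(to_idx[item.capitalize()])
--             elif item.upper() in to_idx:
--                 v.append(to_idx[item.upper()])
--             elif item.lower() in to_idx:
--                 v.append(to_idx[item.lower()])
--             else:
--                 v.append(to_idx['UNK'])
--         return v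
--     else:
--         return [to_idx[item] for item in sequence]
-- ===== SOURCE B (Python) =====
-- def vectorize_sequence(sequence, to_idx):
--     if 'UNK' in to_idx:
--         # staged passes: resolve exact matches first, then fill the holes
--         # with capitalize, then upper, then lower, then UNK
--         v = [to_idx.get(item) for item in sequence]
--         for f in (str.capitalize, str.upper, str.lower):
--             v = [x if x is not None else to_idx.get(f(item))
--                  for item, x in zip(sequence, v)]
--         return [x if x is not None else to_idx['UNK'] for x in v]
--     else:
--         return [to_idx[item] for item in sequence]
-- ===== Notes on version B (the rewrite author's own statement) =====
-- stated objective: alternative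
-- what changed: Instead of A's single pass with a four-way elif ladder per item, B runs staged whole-list passes: one pass of exact lookups producing Optionals, then one fill-the-holes pass per case transformation (capitalize, upper, lower), then a final pass replacing remaining holes with the UNK index.
import Mathlib
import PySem

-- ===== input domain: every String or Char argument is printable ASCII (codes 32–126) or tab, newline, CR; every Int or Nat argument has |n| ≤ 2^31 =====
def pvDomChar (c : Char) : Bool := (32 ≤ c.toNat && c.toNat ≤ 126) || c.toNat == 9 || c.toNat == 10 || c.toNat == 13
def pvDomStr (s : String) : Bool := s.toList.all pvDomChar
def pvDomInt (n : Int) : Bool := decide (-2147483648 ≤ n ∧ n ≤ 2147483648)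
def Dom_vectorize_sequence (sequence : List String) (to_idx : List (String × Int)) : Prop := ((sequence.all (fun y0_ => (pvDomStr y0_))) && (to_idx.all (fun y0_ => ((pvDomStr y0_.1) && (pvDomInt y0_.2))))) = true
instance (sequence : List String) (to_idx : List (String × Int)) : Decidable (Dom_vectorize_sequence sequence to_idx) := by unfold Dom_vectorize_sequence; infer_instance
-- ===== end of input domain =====

-- B replaces A's single-pass four-way elif ladder with staged whole-list passes
-- (exact lookups to Optionals, then one fill-the-holes pass per case form, then UNK); objective: alternative.

-- Python str.capitalize, exact on the ASCII domain: first char uppercased, the rest lowercased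
def pyCapitalize (s : String) : String :=
  match s.toList with
  | [] => s
  | c :: rest => String.ofList (PySem.Chars.upperChar c :: PySem.Chars.lower rest)

-- ===== PORT A =====
def vectorize_sequence (sequence : List String) (to_idx : List (String × Int)) : List Int :=
  let d : PySem.Dict String Int := PySem.Dict.mk to_idx
  if d.contains "UNK" then
    sequence.foldl (fun v item =>
      if d.contains item then v ++ [d.getD item 0]
      else if d.contains (pyCapitalize item) then v ++ [d.getD (pyCapitalize item) 0]
      else if d.contains (PySem.Str.upper item) then v ++ [d.getD (PySem.Str.upper item) 0]
      else if d.contains (PySem.Str.lower item) then v ++ [d.getD (PySem.Str.lower item) 0]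
      else v ++ [d.getD "UNK" 0]) []
  else
    sequence.map (fun item => d.getD item 0)

-- ===== PORT B =====
-- one fill-the-holes pass: keep resolved entries, look up f(item) for the holes
def pvStage (d : PySem.Dict String Int) (f : String → String)
    (sequence : List String) (v : List (Option Int)) : List (Option Int) :=
  (sequence.zip v).map (fun p =>
    match p.2 with
    | some y => some y
    | none => d.get? (f p.1))

def vectorize_sequence_alt (sequence : List String) (to_idx : List (String × Int)) : List Int :=
  let d : PySem.Dict String Int := PySem.Dict.mk to_idx
  if d.contains "UNK" then
    let v0 : List (Option Int) := sequence.map (fun item => d.get? item)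
    let v := [pyCapitalize, PySem.Str.upper, PySem.Str.lower].foldl
      (fun v f => pvStage d f sequence v) v0
    v.map (fun x =>
      match x with
      | some y => y
      | none => d.getD "UNK" 0)
  else
    sequence.map (fun item => d.getD item 0)

-- ===== PRECONDITION & SPEC =====
-- Pre_ excludes exactly the inputs where Python A raises KeyError: to_idx has no 'UNK' key and some item of sequence is missing from to_idx.
def Pre_vectorize_sequence (sequence : List String) (to_idx : List (String × Int)) : Prop :=
  (∃ p ∈ to_idx, p.1 = "UNK") ∨ ∀ item ∈ sequence, ∃ p ∈ to_idx, p.1 = item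
instance (sequence : List String) (to_idx : List (String × Int)) : Decidable (Pre_vectorize_sequence sequence to_idx) := by unfold Pre_vectorize_sequence; infer_instance

def pvWitness_vectorize_sequence : List String × (List (String × Int)) :=
  (["the", "The", "zzz"], [("the", 0), ("UNK", 1)])

def Spec_vectorize_sequence (sequence : List String) (to_idx : List (String × Int)) (out : List Int) : Prop := out = vectorize_sequence_alt sequence to_idx
instance (sequence : List String) (to_idx : List (String × Int)) (out : List Int) : Decidable (Spec_vectorize_sequence sequence to_idx out) := by unfold Spec_vectorize_sequence; infer_instance

-- ===== CLAIM =====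
def Claim_equal_vectorize_sequence : Prop := ∀ (sequence : List String) (to_idx : List (String × Int)), Dom_vectorize_sequence sequence to_idx → Pre_vectorize_sequence sequence to_idx → Spec_vectorize_sequence sequence to_idx (vectorize_sequence sequence to_idx)

-- ===== LEMMAS AND PROOFS =====

-- A's per-item elif ladder as a function (proof helper)
def pvLookA (d : PySem.Dict String Int) (item : String) : Int :=
  if d.contains item then d.getD item 0
  else if d.contains (pyCapitalize item) then d.getD (pyCapitalize item) 0
  else if d.contains (PySem.Str.upper item) then d.getD (PySem.Str.upper item) 0
  else if d.contains (PySem.Str.lower item) then d.getD (PySem.Str.lower item) 0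
  else d.getD "UNK" 0

lemma foldA_eq_map (d : PySem.Dict String Int) (xs : List String) (acc : List Int) :
    xs.foldl (fun v item =>
      if d.contains item then v ++ [d.getD item 0]
      else if d.contains (pyCapitalize item) then v ++ [d.getD (pyCapitalize item) 0]
      else if d.contains (PySem.Str.upper item) then v ++ [d.getD (PySem.Str.upper item) 0]
      else if d.contains (PySem.Str.lower item) then v ++ [d.getD (PySem.Str.lower item) 0]
      else v ++ [d.getD "UNK" 0]) acc = acc ++ xs.map (pvLookA d) := by
  induction xs generalizing acc with
  | nil => simp
  | cons x xs ih =>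
    simp only [List.foldl_cons, List.map_cons, ih, pvLookA]
    split_ifs <;> simp

-- a stage applied to a per-item map is a per-item map
lemma stage_map (d : PySem.Dict String Int) (f : String → String)
    (xs : List String) (g : String → Option Int) :
    pvStage d f xs (xs.map g) =
      xs.map (fun item =>
        match g item with
        | some y => some y
        | none => d.get? (f item)) := by
  unfold pvStage
  induction xs with
  | nil => rfl
  | cons x xs ih => simpa using ih

lemma lookA_eq_lookB (d : PySem.Dict String Int) (item : String) :
    pvLookA d item =
      (match
        (match
          (match
            (match d.get? item with
             | some y => some y
             | none => d.get? (pyCapitalize item)) with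
           | some y => some y
           | none => d.get? (PySem.Str.upper item)) with
         | some y => some y
         | none => d.get? (PySem.Str.lower item)) with
       | some y => y
       | none => d.getD "UNK" 0) := by
  unfold pvLookA
  rw [PySem.Dict.contains_eq_isSome_get? , PySem.Dict.contains_eq_isSome_get?,
      PySem.Dict.contains_eq_isSome_get?, PySem.Dict.contains_eq_isSome_get?]
  cases h1 : d.get? item <;>
  cases h2 : d.get? (pyCapitalize item) <;>
  cases h3 : d.get? (PySem.Str.upper item) <;>
  cases h4 : d.get? (PySem.Str.lower item) <;>
  simp [PySem.Dict.getD_eq_get?_getD, h1, h2, h3, h4]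

-- ===== VERDICT =====
theorem vectorize_sequence_spec : Claim_equal_vectorize_sequence := by
  intro sequence to_idx _hdom _hpre
  unfold Spec_vectorize_sequence vectorize_sequence vectorize_sequence_alt
  cases h : (PySem.Dict.mk to_idx).contains "UNK" with
  | false => simp [h]
  | true =>
    simp only [h, if_true, foldA_eq_map, List.nil_append, List.foldl_cons, List.foldl_nil,
      stage_map, List.map_map]
    exact List.map_congr_left (fun item _ => lookA_eq_lookB _ item)
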